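-- pv_equiv track=rewrite | github.com/Mustafaygtbs/Web-AI-Scraper | AI Web Scraper/parse.py | format_table_output
-- ===== SOURCE A (Python) =====
-- def format_table_output(text):
--
--     if not text or "|" not in text:
--         return text
--
--     lines = text.strip().split('\n')
--     if len(lines) < 2:
--         return text
--
--
--     header_line = lines[0]
--     headers = [h.strip() for h in header_line.strip('|').split('|')]
--     col_widths = [max(len(h), 3) for h in headers]
--
--
--     for line in lines[2:]:
--         if '|' in line:
--             cells = [c.strip() for c in line.strip('|').split('|')]
--             for i, cell in enumerate(cells):
--                 if i < len(col_widths):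
--                     col_widths[i] = max(col_widths[i], len(cell))
--
--
--     formatted_lines = []
--
--
--     header_cells = [h.strip() for h in lines[0].strip('|').split('|')]
--     header_line = '| ' + ' | '.join([header_cells[i].ljust(col_widths[i]) for i in range(len(header_cells))]) + ' |'
--     formatted_lines.append(header_line)
--
--
--     separator = '|' + '|'.join(['-' * (col_widths[i] + 2) for i in range(len(col_widths))]) + '|'
--     formatted_lines.append(separator)
--
--     for line in lines[2:]:
--         if '|' in line:
--             cells = [c.strip() for c in line.strip('|').split('|')]
--             if len(cells) == len(col_widths):
--                 formatted_line = '| ' + ' | '.join([cells[i].ljust(col_widths[i]) for i in range(len(cells))]) + ' |'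
--                 formatted_lines.append(formatted_line)
--             else:
--                 formatted_lines.append(line)
--
--     return '\n'.join(formatted_lines)
-- ===== SOURCE B (Python) =====
-- def format_table_output(text):
--     if not text or "|" not in text:
--         return text
--     lines = text.strip().split('\n')
--     if len(lines) < 2:
--         return text
--
--     def cells_of(line):
--         return [c.strip() for c in line.strip('|').split('|')]
--
--     headers = cells_of(lines[0])
--     n = len(headers)
--     kept = [l for l in lines[2:] if '|' in l]
--     parsed = [cells_of(l) for l in kept]
--     good = [cs for cs in parsed if len(cs) == n]
--
--     # column-major phase: for each column compute its width, its padded header,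
--     # its separator segment and the whole padded column of the well-formed rows
--     head_cells, sep_parts, padded_cols = [], [], []
--     for i, h in enumerate(headers):
--         w = max([len(h), 3] + [len(cs[i]) for cs in parsed if i < len(cs)])
--         head_cells.append(h.ljust(w))
--         sep_parts.append('-' * (w + 2))
--         padded_cols.append([cs[i].ljust(w) for cs in good])
--
--     # transpose the padded columns back into rendered rows
--     rendered = iter('| ' + ' | '.join(row) + ' |' for row in zip(*padded_cols))
--     out = ['| ' + ' | '.join(head_cells) + ' |',
--            '|' + '|'.join(sep_parts) + '|']
--     for raw, cs in zip(kept, parsed):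
--         out.append(next(rendered) if len(cs) == n else raw)
--     return '\n'.join(out)
-- ===== Notes on version B (the rewrite author's own statement) =====
-- stated objective: alternative
-- what changed: B works column-major: it pads each column as a whole (computing per column its width, padded header cell, separator segment and the fully padded body column) and then transposes the padded columns back into rows with zip(*cols), popping one pre-rendered row per well-formed line, instead of A's two row-major passes that re-split every line and pad cell-by-cell within each row.
import Mathlib
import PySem

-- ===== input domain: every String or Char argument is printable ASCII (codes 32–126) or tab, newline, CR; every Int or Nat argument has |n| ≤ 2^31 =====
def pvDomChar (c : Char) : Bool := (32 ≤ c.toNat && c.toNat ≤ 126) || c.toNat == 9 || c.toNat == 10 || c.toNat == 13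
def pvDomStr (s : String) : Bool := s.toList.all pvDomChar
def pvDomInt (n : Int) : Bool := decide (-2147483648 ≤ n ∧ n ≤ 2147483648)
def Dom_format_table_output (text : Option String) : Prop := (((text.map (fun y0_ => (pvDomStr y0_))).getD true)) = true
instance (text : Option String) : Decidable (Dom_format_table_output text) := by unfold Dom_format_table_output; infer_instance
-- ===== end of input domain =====

-- B re-formats the table column-major: it pads each column as a whole (widths, header cell,
-- separator segment and the padded body column computed per column) and transposes the padded
-- columns back into rows, instead of A's two row-major passes (objective: alternative, same cost).

-- ===== PORT A =====
-- shared cell parser: both Pythons spell it '[c.strip() for c in line.strip('|').split('|')]'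
def pvCells (line : List Char) : List (List Char) :=
  (PySem.Chars.splitOn (PySem.Chars.stripChars line ['|']) ['|']).map PySem.Chars.strip

-- str.ljust(w): pad on the right with spaces up to width w (exact, Nat subtraction)
def pvLjust (s : List Char) (w : Nat) : List Char := s ++ List.replicate (w - s.length) ' '

-- body of A's inner 'for i, cell in enumerate(cells): if i < len(col_widths): …'
def pvStepCell (ws : List Nat) (ic : Int × List Char) : List Nat :=
  if ic.1 < (ws.length : Int) then ws.set ic.1.toNat (max (ws.getD ic.1.toNat 0) ic.2.length) else ws

-- A's width loop: 'for line in lines[2:]: if '|' in line: … for i, cell in enumerate(cells): …'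
def pvAWidths (H : List (List Char)) (B2 : List (List Char)) : List Nat :=
  B2.foldl (fun ws line =>
      if PySem.Chars.isIn ['|'] line then
        (PySem.List.enumerate (pvCells line)).foldl pvStepCell ws
      else ws) (H.map (fun h => max h.length 3))

-- A's row rendering: '| ' + ' | '.join([cells[i].ljust(col_widths[i]) for i in range(len(cells))]) + ' |'
def pvRenderA (cells : List (List Char)) (cw : List Nat) : List Char :=
  ['|', ' '] ++ PySem.Chars.join [' ', '|', ' ']
    ((List.range cells.length).map (fun i => pvLjust (cells.getD i []) (cw.getD i 0))) ++ [' ', '|']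

def format_table_output (text : Option String) : Option String :=
  match text with
  | none => none
  | some t =>
    let s := t.toList
    if s.length = 0 || !PySem.Chars.isIn ['|'] s then some t
    else
      let lines := PySem.Chars.splitOn (PySem.Chars.strip s) ['\n']
      if lines.length < 2 then some t
      else
        let headers := pvCells (lines.getD 0 [])
        let cw := pvAWidths headers (lines.drop 2)
        let headerCells := pvCells (lines.getD 0 [])
        let headerLine := pvRenderA headerCells cw
        let sep := ['|'] ++ PySem.Chars.join ['|']
            ((List.range cw.length).map (fun i => List.replicate (cw.getD i 0 + 2) '-')) ++ ['|']
        let formatted := (lines.drop 2).foldl (fun acc line =>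
            if PySem.Chars.isIn ['|'] line then
              let cells := pvCells line
              if cells.length = cw.length then acc ++ [pvRenderA cells cw]
              else acc ++ [line]
            else acc) [headerLine, sep]
        some (String.ofList (PySem.Chars.join ['\n'] formatted))

-- ===== PORT B =====
-- max([len(h), 3] + [len(c) for c in column cells])
def pvColWidth (h : List Char) (col : List (List Char)) : Nat :=
  (col.map List.length).foldl max (max h.length 3)

-- '| ' + ' | '.join(row) + ' |'
def pvRowOf (cells : List (List Char)) : List Char :=
  ['|', ' '] ++ PySem.Chars.join [' ', '|', ' '] cells ++ [' ', '|']

-- zip(*cols): truncating transpose — rows up to the shortest column, j-th row = j-th entry of each column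
def pvZipStar (cols : List (List (List Char))) : List (List (List Char)) :=
  (List.range ((cols.map List.length).min?.getD 0)).map (fun j => cols.map (fun c => c.getD j []))

def format_table_output_alt (text : Option String) : Option String :=
  match text with
  | none => none
  | some t =>
    let s := t.toList
    if s.length = 0 || !PySem.Chars.isIn ['|'] s then some t
    else
      let lines := PySem.Chars.splitOn (PySem.Chars.strip s) ['\n']
      if lines.length < 2 then some t
      else
        let headers := pvCells (lines.getD 0 [])
        let n := headers.length
        let kept := (lines.drop 2).filter (fun l => PySem.Chars.isIn ['|'] l)
        let parsed := kept.map pvCells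
        let good := parsed.filter (fun cs => cs.length == n)
        -- column-major phase: one triple (padded header, separator segment, padded column) per column
        let colData := (PySem.List.enumerate headers).map (fun ih =>
          let w := pvColWidth ih.2 (parsed.filterMap (fun cs => cs[ih.1.toNat]?))
          (pvLjust ih.2 w, List.replicate (w + 2) '-',
            -- cs[i] is in range: every cs in good has length n > i
            good.map (fun cs => pvLjust (cs.getD ih.1.toNat []) w)))
        let rendered := (pvZipStar (colData.map (fun d => d.2.2))).map pvRowOf
        let out0 := [pvRowOf (colData.map (fun d => d.1)),
                     ['|'] ++ PySem.Chars.join ['|'] (colData.map (fun d => d.2.1)) ++ ['|']]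
        -- next(rendered) never exhausts: rendered has one row per well-formed line
        let res := (kept.zip parsed).foldl (fun st rc =>
            if rc.2.length = n then (st.1 ++ [st.2.headD []], st.2.tail)
            else (st.1 ++ [rc.1], st.2)) (out0, rendered)
        some (String.ofList (PySem.Chars.join ['\n'] res.1))

-- ===== PRECONDITION & SPEC =====
def Spec_format_table_output (text : Option String) (out : Option String) : Prop := out = format_table_output_alt text
instance (text : Option String) (out : Option String) : Decidable (Spec_format_table_output text out) := by unfold Spec_format_table_output; infer_instance

-- ===== CLAIM (what is proved, stated in full; the proofs are below) =====
def Claim_equal_format_table_output : Prop := ∀ (text : Option String), Dom_format_table_output text → Spec_format_table_output text (format_table_output text)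

-- ===== LEMMAS AND PROOFS =====

-- the cell parser never yields the empty list (Python's split returns ≥ 1 piece)
theorem pvSplitOnGo_ne (sep : List Char) (fuel : Nat) (s cur : List Char) (acc : List (List Char)) :
    PySem.Chars.splitOn.go sep fuel s cur acc ≠ [] := by
  induction fuel generalizing s cur acc with
  | zero => simp [PySem.Chars.splitOn.go]
  | succ n ih =>
    unfold PySem.Chars.splitOn.go
    split
    · simp
    · simp
    · rename_i f c rest heq
      obtain rfl : f = n := by omega
      split
      · exact ih _ _ _
      · exact ih _ _ _

theorem pvCells_ne_nil (line : List Char) : pvCells line ≠ [] := by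
  unfold pvCells
  intro h
  exact pvSplitOnGo_ne _ _ _ _ _ (List.map_eq_nil_iff.mp h)

-- pointwise merge of a width list with one row's cells (extra cells ignored, extra widths kept)
def pvMerge (ws : List Nat) (cs : List (List Char)) : List Nat :=
  List.zipWith (fun w c => max w c.length) ws cs ++ ws.drop cs.length

theorem pvMerge_cons (w : Nat) (ws : List Nat) (c : List Char) (cs : List (List Char)) :
    pvMerge (w :: ws) (c :: cs) = max w c.length :: pvMerge ws cs := by
  simp [pvMerge]

theorem pvMerge_length (ws : List Nat) (cs : List (List Char)) :
    (pvMerge ws cs).length = ws.length := by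
  simp [pvMerge]; omega

theorem pvMerge_getD (ws : List Nat) (cs : List (List Char)) (i : Nat) (hi : i < ws.length) :
    (pvMerge ws cs).getD i 0 =
      match cs[i]? with
      | some c => max (ws.getD i 0) c.length
      | none => ws.getD i 0 := by
  by_cases h : i < cs.length
  · have h1 : i < (List.zipWith (fun w c => max w c.length) ws cs).length := by
      simp; omega
    rw [pvMerge, List.getD_append _ _ _ _ h1]
    simp [List.getD_eq_getElem?_getD, h, hi]
  · have h1 : cs[i]? = none := by simp; omega
    rw [pvMerge, h1]
    have h2 : (List.zipWith (fun w c => max w c.length) ws cs).length = cs.length := by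
      simp; omega
    rw [List.getD_eq_getElem?_getD, List.getElem?_append_right (by omega), List.getElem?_drop,
       List.getD_eq_getElem?_getD]
    congr 2
    rw [h2]
    omega

-- A's inner enumerate-fold over one row is the pointwise merge from position k on
theorem pvInnerFold (cs : List (List Char)) (k : Nat) (ws : List Nat) :
    (PySem.List.enumerate cs (k : Int)).foldl pvStepCell ws =
      ws.take k ++ pvMerge (ws.drop k) cs := by
  induction cs generalizing k ws with
  | nil => simp [PySem.List.enumerate, pvMerge]
  | cons c cs ih =>
    rw [PySem.List.enumerate_cons, List.foldl_cons]
    have hcast : (k : Int) + 1 = ((k + 1 : Nat) : Int) := by push_cast; ring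
    by_cases hk : k < ws.length
    · have hstep : pvStepCell ws ((k : Int), c) =
          ws.set k (max (ws.getD k 0) c.length) := by
        simp [pvStepCell]; omega
      rw [hstep, hcast, ih]
      have hset : ws.set k (max (ws.getD k 0) c.length) =
          ws.take k ++ max (ws.getD k 0) c.length :: ws.drop (k + 1) :=
        List.set_eq_take_cons_drop _ hk
      rw [hset]
      have hlt : (ws.take k).length = k := List.length_take_of_le (le_of_lt hk)
      set v := max (ws.getD k 0) c.length with hv
      have hW1 : (ws.take k ++ v :: ws.drop (k+1)).take (k+1) = ws.take k ++ [v] := by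
        rw [List.take_append, hlt]
        simp [List.take_take]
      have hW2 : (ws.take k ++ v :: ws.drop (k+1)).drop (k+1) = ws.drop (k+1) := by
        rw [List.drop_append, hlt]
        simp [List.drop_eq_nil_of_le (by rw [hlt]; omega : (ws.take k).length ≤ k+1)]
      rw [hW1, hW2, List.append_assoc]
      congr 1
      have hgd : ws.getD k 0 = ws[k] := by
        simp [List.getD_eq_getElem?_getD, hk]
      rw [List.drop_eq_getElem_cons hk, pvMerge_cons, List.singleton_append, hv, hgd]
    · have hstep : pvStepCell ws ((k : Int), c) = ws := by
        simp [pvStepCell]; omega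
      rw [hstep, hcast, ih]
      have h1 : ws.drop k = [] := List.drop_eq_nil_of_le (by omega)
      have h2 : ws.drop (k+1) = [] := List.drop_eq_nil_of_le (by omega)
      simp [h1, h2, pvMerge, List.take_of_length_le (le_of_not_gt hk),
        List.take_of_length_le (show ws.length <= k+1 by omega)]

theorem pvInnerFold0 (cs : List (List Char)) (ws : List Nat) :
    (PySem.List.enumerate cs).foldl pvStepCell ws = pvMerge ws cs := by
  simpa using pvInnerFold cs 0 ws

-- a foldl whose body is guarded by 'if p x' is a foldl over the filter
theorem pvFoldlIfFilter {A B : Type} (p : A -> Bool) (f : B -> A -> B) (l : List A) (a : B) :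
    l.foldl (fun acc x => if p x then f acc x else acc) a = (l.filter p).foldl f a := by
  induction l generalizing a with
  | nil => rfl
  | cons x l ih => by_cases h : p x <;> simp [h, ih]

-- an enumerate-map is the corresponding range-map
theorem pvEnumMap {A B : Type} (xs : List A) (d : A) (f : Nat -> A -> B) :
    (PySem.List.enumerate xs).map (fun p => f p.1.toNat p.2) =
      (List.range xs.length).map (fun i => f i (xs.getD i d)) := by
  apply List.ext_getElem
  · simp [PySem.List.length_enumerate]
  · intro i h1 h2
    have hx : i < xs.length := by simpa [PySem.List.length_enumerate] using h1
    rw [List.getElem_map, List.getElem_map, PySem.List.getElem_enumerate, List.getElem_range]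
    simp [List.getD_eq_getElem?_getD, hx]

theorem pvFoldMerge_length (CS : List (List (List Char))) (ws : List Nat) :
    (CS.foldl pvMerge ws).length = ws.length := by
  induction CS generalizing ws with
  | nil => rfl
  | cons cs CS ih => simpa [pvMerge_length] using ih (pvMerge ws cs)

theorem pvFoldMerge_getD (CS : List (List (List Char))) (ws : List Nat) (i : Nat)
    (hi : i < ws.length) :
    (CS.foldl pvMerge ws).getD i 0 =
      ((CS.filterMap (fun cs => cs[i]?)).map List.length).foldl max (ws.getD i 0) := by
  induction CS generalizing ws with
  | nil => rfl
  | cons cs CS ih =>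
    have hlen : i < (pvMerge ws cs).length := by rw [pvMerge_length]; exact hi
    have := ih (pvMerge ws cs) hlen
    simp only [List.foldl_cons, List.filterMap_cons]
    cases h : cs[i]? with
    | none => rw [this, pvMerge_getD ws cs i hi, h]
    | some c => rw [this, pvMerge_getD ws cs i hi, h]; simp

-- the folded merges compute the column-wise widths
theorem pvFoldMerge_eq_map (CS : List (List (List Char))) (H : List (List Char)) :
    CS.foldl pvMerge (H.map (fun h => max h.length 3)) =
      (PySem.List.enumerate H).map (fun ih =>
        pvColWidth ih.2 (CS.filterMap (fun cs => cs[ih.1.toNat]?))) := by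
  apply List.ext_getElem
  · simp [pvFoldMerge_length, PySem.List.length_enumerate]
  · intro i h1 h2
    have hi : i < (H.map (fun h => max h.length 3)).length := by
      simpa [pvFoldMerge_length] using h1
    have hiH : i < H.length := by simpa using hi
    have hgd := pvFoldMerge_getD CS (H.map (fun h => max h.length 3)) i hi
    rw [List.getElem_eq_getD (fallback := 0), hgd]
    have hws : (H.map (fun h => max h.length 3)).getD i 0 = max H[i].length 3 := by
      simp [List.getD_eq_getElem?_getD, hiH]
    rw [hws]
    rw [List.getElem_map, PySem.List.getElem_enumerate]
    simp [pvColWidth]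

-- A's whole width loop computes B's per-column widths over the kept, parsed lines
theorem pvWidths_eq (B2 : List (List Char)) (H : List (List Char)) :
    pvAWidths H B2 =
      (PySem.List.enumerate H).map (fun ih =>
        pvColWidth ih.2
          (((B2.filter (fun l => PySem.Chars.isIn ['|'] l)).map pvCells).filterMap
            (fun cs => cs[ih.1.toNat]?))) := by
  unfold pvAWidths
  simp only [pvInnerFold0]
  rw [pvFoldlIfFilter, ← List.foldl_map, pvFoldMerge_eq_map]

-- min? of a constant nonempty list
theorem pvConstMin {A : Type} (l : List A) (m : Nat) (h : l ≠ []) :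
    ((l.map (fun _ => m)).min?) = some m := by
  induction l with
  | nil => exact absurd rfl h
  | cons a t ih =>
    cases t with
    | nil => simp [List.min?]
    | cons b t' => simp_all [List.min?_cons]

-- zip(*…) of columns generated from a list of descriptors is the row-major map
theorem pvZipStar_map {B C : Type} (L : List B) (G : List C)
    (f : B -> C -> List Char) (hL : L ≠ []) :
    pvZipStar (L.map (fun b => G.map (f b))) = G.map (fun g => L.map (fun b => f b g)) := by
  unfold pvZipStar
  have hlen : (L.map (fun b => G.map (f b))).map List.length = L.map (fun _ => G.length) := by
    simp [List.map_map, Function.comp_def]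
  rw [hlen, pvConstMin L G.length hL]
  apply List.ext_getElem
  · simp
  · intro j h1 h2
    simp only [List.getElem_map, List.getElem_range, List.map_map]
    apply List.map_congr_left
    intro b _
    have hj : j < G.length := by simpa using h1
    simp [List.getD_eq_getElem?_getD, hj]

-- the interleaving loop that pops one pre-rendered row per well-formed pair
theorem pvInterleave {A B : Type} (ps : List (A × List (List Char))) (n : Nat)
    (g : List (List Char) -> B) (f : A -> B) (out : List B) (d : B) :
    ((ps.foldl (fun st rc =>
        if rc.2.length = n then (st.1 ++ [st.2.headD d], st.2.tail)
        else (st.1 ++ [f rc.1], st.2))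
      (out, ((ps.map Prod.snd).filter (fun cs => cs.length == n)).map g)).1) =
      out ++ ps.map (fun rc => if rc.2.length = n then g rc.2 else f rc.1) := by
  induction ps generalizing out with
  | nil => simp
  | cons rc ps ih =>
    by_cases h : rc.2.length = n
    · simp only [List.map_cons, List.filter_cons, h, beq_self_eq_true, if_true, List.foldl_cons]
      rw [show (((g rc.2) :: ((ps.map Prod.snd).filter (fun cs => cs.length == n)).map g).headD d) = g rc.2 from rfl]
      simp only [List.tail_cons]
      rw [ih]
      simp
    · simp only [List.map_cons, List.filter_cons, List.foldl_cons, h, if_false]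
      have hb : (rc.2.length == n) = false := by simp [h]
      rw [hb]
      simp only [Bool.false_eq_true, if_false]
      rw [ih]
      simp

-- l.zip (l.map f) pairs each element with its image
theorem pvZipSelfMap {A B : Type} (l : List A) (f : A -> B) :
    l.zip (l.map f) = l.map (fun x => (x, f x)) := by
  induction l with
  | nil => rfl
  | cons a t ih => simp [ih]

def pvW (parsed : List (List (List Char))) (i : Nat) (h : List Char) : Nat :=
  pvColWidth h (parsed.filterMap (fun cs => cs[i]?))

theorem pvGetD_map_range {A : Type} (m i : Nat) (u : Nat -> A) (d : A) (h : i < m) :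
    ((List.range m).map u).getD i d = u i := by
  simp [List.getD_eq_getElem?_getD, h]

-- ===== VERDICT (by name: the statement is the Claim_ definition above) =====
theorem format_table_output_spec : Claim_equal_format_table_output := by
  intro text _
  unfold Spec_format_table_output
  cases text with
  | none => rfl
  | some t =>
  simp only [format_table_output, format_table_output_alt]
  split_ifs with h1 h2
  · rfl
  · rfl
  · refine congrArg (fun L => some (String.ofList (PySem.Chars.join ['\n'] L))) ?_
    generalize PySem.Chars.splitOn (PySem.Chars.strip t.toList) ['\n'] = lines
    set H := pvCells (lines.getD 0 []) with hH
    set B2 := List.drop 2 lines with hB2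
    set kept := List.filter (fun l => PySem.Chars.isIn ['|'] l) B2 with hkept
    set parsed := List.map pvCells kept with hparsed
    set cw := pvAWidths H B2 with hcw
    set good := List.filter (fun cs => cs.length == H.length) parsed with hgood
    -- widths facts
    have hHne : H ≠ [] := pvCells_ne_nil _
    have hWeq : cw = (List.range H.length).map (fun i => pvW parsed i (H.getD i [])) := by
      rw [hcw, pvWidths_eq, ← hkept, ← hparsed]
      rw [show (fun ih : Int × List Char => pvColWidth ih.2 (parsed.filterMap (fun cs => cs[ih.1.toNat]?)))
            = (fun p : Int × List Char => pvW parsed p.1.toNat p.2) from rfl]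
      exact pvEnumMap H [] (pvW parsed)
    have hLen : cw.length = H.length := by rw [hWeq]; simp
    have hGet : ∀ i, i < H.length → cw.getD i 0 = pvW parsed i (H.getD i []) := by
      intro i hi
      rw [hWeq, pvGetD_map_range _ _ _ _ hi]
    simp only [List.map_map]
    dsimp only [Function.comp_def]
    -- enumerate H is nonempty
    have hEne : PySem.List.enumerate H (0 : Int) ≠ [] := by
      intro h
      apply hHne
      have hs := PySem.List.map_snd_enumerate H (0 : Int)
      rw [h] at hs
      simpa using hs.symm
    rw [pvZipStar_map (PySem.List.enumerate H) good
        (fun x cs => pvLjust (cs.getD x.1.toNat [])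
          (pvColWidth x.2 (List.filterMap (fun cs => cs[x.1.toNat]?) parsed))) hEne]
    rw [List.map_map]
    dsimp only [Function.comp_def]
    -- interleave: the fold pops exactly the pre-rendered row of each well-formed line
    have hsnd : (kept.zip parsed).map Prod.snd = parsed := by
      rw [hparsed, pvZipSelfMap kept pvCells, List.map_map]
      rfl
    have hrem : List.map
            (fun x =>
              pvRowOf
                (List.map
                  (fun b =>
                    pvLjust (x.getD b.1.toNat []) (pvColWidth b.2 (List.filterMap (fun cs => cs[b.1.toNat]?) parsed)))
                  (PySem.List.enumerate H)))
            good =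
        ((((kept.zip parsed).map Prod.snd).filter (fun cs => cs.length == H.length)).map
            (fun x =>
              pvRowOf
                (List.map
                  (fun b =>
                    pvLjust (x.getD b.1.toNat []) (pvColWidth b.2 (List.filterMap (fun cs => cs[b.1.toNat]?) parsed)))
                  (PySem.List.enumerate H)))) := by
      rw [hsnd, ← hgood]
    rw [hrem, pvInterleave (kept.zip parsed) H.length
        (fun x =>
          pvRowOf
            (List.map
              (fun b =>
                pvLjust (x.getD b.1.toNat []) (pvColWidth b.2 (List.filterMap (fun cs => cs[b.1.toNat]?) parsed)))
              (PySem.List.enumerate H)))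
        (fun a => a) _ []]
    rw [hparsed, pvZipSelfMap kept pvCells, List.map_map]
    dsimp only [Function.comp_def]
    rw [← hparsed]
    -- A's output loop appends one line per kept line
    rw [show (fun (acc : List (List Char)) line =>
        if PySem.Chars.isIn ['|'] line = true then
          if (pvCells line).length = cw.length then acc ++ [pvRenderA (pvCells line) cw] else acc ++ [line]
        else acc) = (fun acc line =>
        if PySem.Chars.isIn ['|'] line = true then
          acc ++ [if (pvCells line).length = cw.length then pvRenderA (pvCells line) cw else line]
        else acc) from by
      funext acc line
      by_cases hb : PySem.Chars.isIn ['|'] line = true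
      · simp only [hb, if_true]
        split_ifs <;> rfl
      · simp [hb]]
    rw [PySem.List.foldl_append_if, ← hkept]
    -- per-row conversion of the enumerate-based padded row to A's range-based one
    have hconv : ∀ (cells : List (List Char)), cells.length = H.length →
        (List.map
          (fun b =>
            pvLjust (cells.getD b.1.toNat [])
              (pvColWidth b.2 (List.filterMap (fun cs => cs[b.1.toNat]?) parsed)))
          (PySem.List.enumerate H)) =
        (List.range cells.length).map (fun i => pvLjust (cells.getD i []) (cw.getD i 0)) := by
      intro cells hc
      rw [show (fun b : Int × List Char =>
            pvLjust (cells.getD b.1.toNat [])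
              (pvColWidth b.2 (List.filterMap (fun cs => cs[b.1.toNat]?) parsed))) =
          (fun p : Int × List Char =>
            (fun i h => pvLjust (cells.getD i []) (pvW parsed i h)) p.1.toNat p.2) from rfl,
        pvEnumMap H [] (fun i h => pvLjust (cells.getD i []) (pvW parsed i h)), hc]
      apply List.map_congr_left
      intro i hi
      rw [hGet i (List.mem_range.mp hi)]
    congr 1
    · congr 1
      · -- header line
        rw [show pvRenderA H cw =
            pvRowOf ((List.range H.length).map (fun i => pvLjust (H.getD i []) (cw.getD i 0))) from rfl]
        congr 1
        rw [show (fun x : Int × List Char =>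
              pvLjust x.2 (pvColWidth x.2 (List.filterMap (fun cs => cs[x.1.toNat]?) parsed))) =
            (fun p : Int × List Char => (fun i h => pvLjust h (pvW parsed i h)) p.1.toNat p.2) from rfl,
          pvEnumMap H [] (fun i h => pvLjust h (pvW parsed i h))]
        apply List.map_congr_left
        intro i hi
        rw [hGet i (List.mem_range.mp hi)]
      · -- separator line
        congr 3
        rw [show (fun x : Int × List Char =>
              List.replicate (pvColWidth x.2 (List.filterMap (fun cs => cs[x.1.toNat]?) parsed) + 2) '-') =
            (fun p : Int × List Char =>
              (fun i h => List.replicate (pvW parsed i h + 2) '-') p.1.toNat p.2) from rfl,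
          pvEnumMap H [] (fun i h => List.replicate (pvW parsed i h + 2) '-'), ← hLen]
        congr 1
        apply List.map_congr_left
        intro i hi
        rw [hGet i (by rw [← hLen]; exact List.mem_range.mp hi)]
    · -- body rows
      simp only [hLen]
      apply List.map_congr_left
      intro l _
      by_cases hc : (pvCells l).length = H.length
      · simp only [hc, if_true]
        rw [show pvRenderA (pvCells l) cw =
            pvRowOf ((List.range (pvCells l).length).map
              (fun i => pvLjust ((pvCells l).getD i []) (cw.getD i 0))) from rfl,
          hconv (pvCells l) hc]
      · simp only [hc, if_false]
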